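-- pv_equiv track=rewrite | github.com/Rohit10701/DSA_python | Data Structure/Array/everybody_likes_good_arry.py | good_array
-- ===== SOURCE A (Python) =====
-- def good_array(ls):
--     if len(ls)==1:
--         return 0
--     i=0
--     count=0
--     while i<len(ls)-1:
--         if ls[i]%2!=ls[i+1]%2:
--             i=i+1
--         else:
--             ls[i+1]=ls[i]*ls[i+1]
--             ls.pop(i)
--             count+=1
--     return count
-- ===== SOURCE B (Python) =====
-- def good_array(ls):
--     return sum(1 for a, b in zip(ls, ls[1:]) if a % 2 == b % 2)
-- ===== Notes on version B (the rewrite author's own statement) =====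
-- stated objective: faster
-- what changed: Replaced the O(n^2) in-place merge simulation (repeated list.pop) by a single pass that counts adjacent pairs of equal parity, which equals the number of merges performed.
import Mathlib
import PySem

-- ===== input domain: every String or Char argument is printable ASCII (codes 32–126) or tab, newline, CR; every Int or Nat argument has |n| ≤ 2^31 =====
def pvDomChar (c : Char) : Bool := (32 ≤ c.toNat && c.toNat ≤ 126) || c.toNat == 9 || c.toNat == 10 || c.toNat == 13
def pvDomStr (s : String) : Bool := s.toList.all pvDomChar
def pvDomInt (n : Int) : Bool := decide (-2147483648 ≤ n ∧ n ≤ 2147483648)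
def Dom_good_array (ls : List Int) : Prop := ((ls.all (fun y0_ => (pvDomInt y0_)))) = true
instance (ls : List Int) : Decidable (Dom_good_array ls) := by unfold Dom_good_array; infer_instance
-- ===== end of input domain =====

-- B replaces A's O(n^2) in-place merge simulation by one O(n) pass counting adjacent equal-parity
-- pairs (proved equal to the number of merges). A mutates its argument in place; the equivalence
-- proved here is about the RETURN value only (B does not mutate).

-- ===== PORT A =====
-- while loop of A: state is the (mutated) list, the index i, and count; each step either
-- advances i or shortens the list, so ls.length - i decreases.
def goodArrayLoop (ls : List Int) (i : Nat) (count : Int) : Int :=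
  if h : i < ls.length - 1 then
    -- indices i and i+1 are in range here, so ls[i] / ls[i+1] are getD with any default (exact)
    if PySem.Int.mod (ls.getD i 0) 2 ≠ PySem.Int.mod (ls.getD (i+1) 0) 2 then
      goodArrayLoop ls (i+1) count
    else
      -- ls[i+1] = ls[i]*ls[i+1]; ls.pop(i): in-range pop is eraseIdx (exact, PySem.List.pop?_natCast)
      goodArrayLoop ((ls.set (i+1) (ls.getD i 0 * ls.getD (i+1) 0)).eraseIdx i) i (count+1)
  else count
termination_by ls.length - i
decreasing_by
  · omega
  · simp only [List.length_eraseIdx, List.length_set]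
    have hi : i < ls.length := by omega
    simp only [if_pos hi]
    omega

def good_array (ls : List Int) : Int :=
  if ls.length == 1 then 0 else goodArrayLoop ls 0 0

-- ===== PORT B =====
-- sum(1 for a, b in zip(ls, ls[1:]) if a % 2 == b % 2)
def good_array_alt (ls : List Int) : Int :=
  (ls.zip (PySem.List.slice ls (some 1) none)).foldl
    (fun acc p => if PySem.Int.mod p.1 2 = PySem.Int.mod p.2 2 then acc + 1 else acc) 0

-- ===== PRECONDITION & SPEC =====
def Spec_good_array (ls : List Int) (out : Int) : Prop := out = good_array_alt ls
instance (ls : List Int) (out : Int) : Decidable (Spec_good_array ls out) := by unfold Spec_good_array; infer_instance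

-- ===== CLAIM (what is proved, stated in full; the proofs are below) =====
def Claim_equal_good_array : Prop := ∀ (ls : List Int), Dom_good_array ls → Spec_good_array ls (good_array ls)

-- ===== LEMMAS AND PROOFS =====

-- structural count of adjacent equal-parity pairs
def pairs : List Int → Int
  | a :: b :: rest =>
      (if PySem.Int.mod a 2 = PySem.Int.mod b 2 then 1 else 0) + pairs (b :: rest)
  | _ => 0

lemma foldl_zip_pairs : ∀ (ls : List Int) (acc : Int),
    (ls.zip ls.tail).foldl
      (fun acc p => if PySem.Int.mod p.1 2 = PySem.Int.mod p.2 2 then acc + 1 else acc) acc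
    = acc + pairs ls
  | [], acc => by simp [pairs]
  | [a], acc => by simp [pairs]
  | a :: b :: rest, acc => by
    have ih := foldl_zip_pairs (b :: rest)
      (if PySem.Int.mod a 2 = PySem.Int.mod b 2 then acc + 1 else acc)
    simp only [List.tail_cons, List.zip_cons_cons, List.foldl_cons] at ih ⊢
    rw [ih, pairs]
    split_ifs <;> ring

lemma alt_eq_pairs (ls : List Int) : good_array_alt ls = pairs ls := by
  unfold good_array_alt
  rw [PySem.List.slice_from_one, foldl_zip_pairs, zero_add]

lemma mod2_mul (a b : Int) (h : PySem.Int.mod a 2 = PySem.Int.mod b 2) :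
    PySem.Int.mod (a * b) 2 = PySem.Int.mod b 2 := by
  have h2 : (0:Int) < 2 := by norm_num
  rw [PySem.Int.mod_eq_emod_of_pos h2] at *
  rw [PySem.Int.mod_eq_emod_of_pos h2] at *
  rw [Int.mul_emod, h]
  rcases Int.emod_two_eq_zero_or_one b with h0 | h0 <;> rw [h0] <;> norm_num

lemma pairs_merge (a b : Int) (t : List Int) (h : PySem.Int.mod a 2 = PySem.Int.mod b 2) :
    pairs (a * b :: t) = pairs (b :: t) := by
  cases t with
  | nil => simp [pairs]
  | cons c rest => simp only [pairs, mod2_mul a b h]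

lemma loop_eq_pairs (ls : List Int) (i : Nat) (count : Int) :
    goodArrayLoop ls i count = count + pairs (ls.drop i) := by
  fun_induction goodArrayLoop ls i count with
  | case1 ls i count h hne ih =>
    have h1 : i < ls.length := by omega
    have h2 : i + 1 < ls.length := by omega
    rw [ih, List.drop_eq_getElem_cons h1, List.drop_eq_getElem_cons h2, pairs,
      List.getD_eq_getElem ls 0 h1, List.getD_eq_getElem ls 0 h2] at *
    rw [if_neg hne, zero_add]
  | case2 ls i count h hne ih =>
    have h1 : i < ls.length := by omega
    have h2 : i + 1 < ls.length := by omega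
    have hpar : PySem.Int.mod (ls.getD i 0) 2 = PySem.Int.mod (ls.getD (i+1) 0) 2 := by
      by_contra hc; exact hne hc
    set p : Int := ls.getD i 0 * ls.getD (i+1) 0 with hp
    have hdropL : ((ls.set (i+1) p).eraseIdx i).drop i = p :: ls.drop (i+2) := by
      rw [List.eraseIdx_eq_take_drop_succ]
      have htake : ((ls.set (i+1) p).take i).length = i := by
        simp [List.length_take]; omega
      have hA := @List.drop_left _ ((ls.set (i+1) p).take i) ((ls.set (i+1) p).drop (i+1))
      rw [htake] at hA
      rw [hA]
      have h2' : i + 1 < (ls.set (i+1) p).length := by simpa using h2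
      rw [List.drop_eq_getElem_cons h2']
      congr 1
      · simp
      · rw [List.drop_set]; simp
    rw [ih, hdropL, List.drop_eq_getElem_cons h1, List.drop_eq_getElem_cons h2, pairs]
    rw [List.getD_eq_getElem ls 0 h1, List.getD_eq_getElem ls 0 h2] at hpar hp
    rw [hp, pairs_merge _ _ _ hpar, if_pos hpar]
    ring
  | case3 ls i count h =>
    have : ls.drop i = [] ∨ ∃ a, ls.drop i = [a] := by
      rcases Nat.lt_or_ge i ls.length with h1 | h1
      · right
        have : ls.length - i = 1 := by omega
        refine ⟨ls[i], ?_⟩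
        rw [List.drop_eq_getElem_cons h1]
        have : (ls.drop (i+1)).length = 0 := by simp; omega
        simp [List.eq_nil_of_length_eq_zero this]
      · left; exact List.drop_eq_nil_of_le h1
    rcases this with h0 | ⟨a, h0⟩ <;> rw [h0] <;> simp [pairs]

theorem good_array_spec' (ls : List Int) : good_array ls = good_array_alt ls := by
  unfold good_array
  rw [alt_eq_pairs]
  split
  · next hl =>
    match ls, hl with
    | [a], _ => simp [pairs]
  · rw [loop_eq_pairs, List.drop_zero, zero_add]

-- ===== VERDICT (by name: the statement is the Claim_ definition above) =====
theorem good_array_spec : Claim_equal_good_array := by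
  intro ls _
  unfold Spec_good_array
  exact (good_array_spec' ls).symm ▸ rfl
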